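-- pv_equiv track=rewrite | github.com/juliandito/python-exercises | List/tugas_no3_odd.py | largest_odd
-- ===== SOURCE A (Python) =====
-- def largest_odd(theList):
--     maxOdd = None
--     for i in range(0, len(theList)):
--         if theList[i] % 2 != 0:
--             maxOdd = theList[i]
--
--     if maxOdd == None:
--         maxOdd = -1
--
--     return maxOdd
-- ===== SOURCE B (Python) =====
-- def largest_odd(theList):
--     for x in reversed(theList):
--         if x % 2 != 0:
--             return x
--     return -1
-- ===== Notes on version B (the rewrite author's own statement) =====
-- stated objective: idiomatic
-- what changed: Replaces the forward index loop with an overwritten accumulator by a reverse traversal that returns the first odd element early, maintaining no running value.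
import Mathlib
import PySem

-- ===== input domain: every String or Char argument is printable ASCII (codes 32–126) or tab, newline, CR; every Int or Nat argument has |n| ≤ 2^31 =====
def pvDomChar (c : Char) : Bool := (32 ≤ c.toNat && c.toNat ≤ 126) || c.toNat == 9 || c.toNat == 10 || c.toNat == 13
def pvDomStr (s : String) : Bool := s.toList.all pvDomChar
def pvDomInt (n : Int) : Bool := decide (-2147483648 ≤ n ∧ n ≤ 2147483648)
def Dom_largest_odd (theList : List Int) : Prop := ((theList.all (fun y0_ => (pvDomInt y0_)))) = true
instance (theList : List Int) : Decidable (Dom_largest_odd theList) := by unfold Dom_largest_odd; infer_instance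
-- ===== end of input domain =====

-- B replaces the forward scan with an overwritten accumulator by a reverse traversal
-- returning the first odd element early (idiomatic, no running value).

-- ===== PORT A =====
-- A: forward loop, maxOdd overwritten at every odd element, None → -1 at the end.
def largest_odd (theList : List Int) : Int :=
  let maxOdd : Option Int :=
    theList.foldl (fun acc x => if PySem.Int.mod x 2 ≠ 0 then some x else acc) none
  match maxOdd with
  | none => -1
  | some v => v

-- ===== PORT B =====
-- B's loop over reversed(theList) with early return, -1 after the loop.
def largestOddRevLoop : List Int → Int
  | [] => -1
  | x :: rest => if PySem.Int.mod x 2 ≠ 0 then x else largestOddRevLoop rest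

def largest_odd_alt (theList : List Int) : Int :=
  largestOddRevLoop theList.reverse

-- ===== PRECONDITION & SPEC =====
def Spec_largest_odd (theList : List Int) (out : Int) : Prop := out = largest_odd_alt theList
instance (theList : List Int) (out : Int) : Decidable (Spec_largest_odd theList out) := by unfold Spec_largest_odd; infer_instance

-- ===== CLAIM (what is proved, stated in full; the proofs are below) =====
def Claim_equal_largest_odd : Prop := ∀ (theList : List Int), Dom_largest_odd theList → Spec_largest_odd theList (largest_odd theList)

-- ===== LEMMAS AND PROOFS =====
-- A's fold with any accumulator equals B's reverse loop, with acc (through A's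
-- final None→-1 translation) as the fallback when the reversed suffix has no odd.
theorem foldl_eq_revloop (l : List Int) :
    ∀ acc : Option Int,
      (match l.foldl (fun acc x => if PySem.Int.mod x 2 ≠ 0 then some x else acc) acc with
        | none => (-1 : Int)
        | some v => v) =
      (match l.reverse.find? (fun x => decide (PySem.Int.mod x 2 ≠ 0)) with
        | none => (match acc with | none => (-1 : Int) | some v => v)
        | some v => v) := by
  induction l with
  | nil => intro acc; simp
  | cons x t ih =>
      intro acc
      simp only [List.foldl_cons, List.reverse_cons, List.find?_append]
      rw [ih]
      by_cases h : Int.fmod x 2 = 0 <;>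
        cases ht : t.reverse.find? (fun x => decide (PySem.Int.mod x 2 ≠ 0)) <;>
          simp_all [PySem.Int.mod]

theorem revloop_eq_find (l : List Int) :
    largestOddRevLoop l =
      (match l.find? (fun x => decide (PySem.Int.mod x 2 ≠ 0)) with
        | none => (-1 : Int)
        | some v => v) := by
  induction l with
  | nil => simp [largestOddRevLoop]
  | cons x t ih =>
      by_cases h : Int.fmod x 2 = 0 <;> simp [largestOddRevLoop, PySem.Int.mod, h, ih]

-- ===== VERDICT (by name: the statement is the Claim_ definition above) =====
theorem largest_odd_spec : Claim_equal_largest_odd := by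
  intro l _
  unfold Spec_largest_odd largest_odd largest_odd_alt
  rw [revloop_eq_find, foldl_eq_revloop]
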